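-- pv_equiv track=rewrite | github.com/mike006322/ProjectEuler | Solutions/PE029_distinct_powers/distinct_powers.py | distinct_powers
-- ===== SOURCE A (Python) =====
-- def gcd(a,b):
--     """
--     returns the greatest common divisor of a and b
--     """
--     while b > 0:
--         a, b = b, a % b
--     return a
--
-- def lcm(a, b):
--     """
--     returns the lowest common multiple of a and b
--     """
--     return a * b // gcd(a, b)
--
-- def count_dupes(exp, n):
--     """
--     returns the number duplicates a number that is a certain power (exp) of another number has
--     """
--     overlaps = [0] * (n + 1)
--     for e in range(1, exp):
--         step = lcm(e, exp) // exp
--         end = e * n // exp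
--         for i in range(2*step, end+1, step):
--             overlaps[i] = 1
--     return sum(overlaps)
--
-- def distinct_powers(n):
--     """
--     input two int's n, n
--     returns number of distinct powers, A**B for 1 < A <= n, 1 < B <= n.
--     """
--     exponents = [1] * (n + 1)
--     # modify the list so that all index**value are unique
--     for i in range(2, len(exponents)):
--         if exponents[i] > 1:
--             continue
--         e = 2
--         while i**e <= n:
--             exponents[i**e] = e
--             e += 1
--     # exponents = [1, 1, 1, 1, 2, 1, 1, 1, 3, 2, 1, ...
--     # only index values that are powers of other numbers contain duplicates
--     # i.e. if exponents[i] > 1, count the duplicates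
--     dupes = {exp: count_dupes(exp, n) for exp in exponents if exp > 1}
--     exponents = [exp for exp in exponents if exp > 1]
--     total_duplicates = 0
--     for exp in exponents:
--         total_duplicates += dupes.get(exp)
--     return (n - 1) * (n - 1) - total_duplicates
-- ===== SOURCE B (Python) =====
-- def count_shared(k, n):
--     """
--     Count exponents b in [2, n] whose combined exponent k*b can also be
--     written d*c with a smaller multiplier d < k and an exponent c <= n:
--     those powers were already produced by a lower power of the same base.
--     """
--     total = 0
--     for b in range(2, n + 1):
--         if any((k * b) % d == 0 and k * b <= d * n for d in range(1, k)):
--             total += 1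
--     return total
--
--
-- def distinct_powers(n):
--     """
--     input two int's n, n
--     returns number of distinct powers, A**B for 1 < A <= n, 1 < B <= n.
--     """
--     # record each perfect power p <= n with its exponent over the smallest base
--     powers = {}
--     base = 2
--     while base * base <= n:
--         if base not in powers:
--             p, k = base * base, 2
--             while p <= n:
--                 powers[p] = k
--                 p *= base
--                 k += 1
--         base += 1
--     shared = {}           # memo: exponent k -> count_shared(k, n)
--     duplicates = 0
--     for k in powers.values():
--         if k not in shared:
--             shared[k] = count_shared(k, n)
--         duplicates += shared[k]
--     return (n - 1) * (n - 1) - duplicates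
-- ===== Notes on version B (the rewrite author's own statement) =====
-- stated objective: alternative
-- what changed: B records perfect powers in a dict driven by a while loop over bases up to sqrt(n) with a multiplying accumulator, and counts each exponent k's duplicated powers by a direct test over exponents b (is k*b = d*c for some smaller multiplier d<k with c<=n?) with a memo dict, instead of A's exponents sieve array plus per-exponent lcm-stepped range marking in a fresh (n+1)-array that is then summed.
import Mathlib
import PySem

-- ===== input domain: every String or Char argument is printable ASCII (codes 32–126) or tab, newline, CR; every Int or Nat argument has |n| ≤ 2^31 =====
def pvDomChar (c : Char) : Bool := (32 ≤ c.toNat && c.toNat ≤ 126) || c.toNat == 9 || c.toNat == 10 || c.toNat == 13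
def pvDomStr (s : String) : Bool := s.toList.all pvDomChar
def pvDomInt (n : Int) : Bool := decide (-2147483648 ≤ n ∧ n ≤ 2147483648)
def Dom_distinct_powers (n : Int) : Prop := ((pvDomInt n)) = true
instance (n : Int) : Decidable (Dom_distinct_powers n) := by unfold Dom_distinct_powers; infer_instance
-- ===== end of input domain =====

-- B records perfect powers in a dict via a sqrt(n)-bounded while loop and counts each
-- exponent's duplicated powers by a direct divisibility test over exponents, instead of
-- A's sieve array with lcm-stepped range marking; same return value, not faster.

-- ===== PORT A =====

-- while b > 0: a, b = b, a % b
def pyGcd (a b : Int) : Int :=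
  if 0 < b then pyGcd b (PySem.Int.mod a b) else a
termination_by b.toNat
decreasing_by
  have h1 := PySem.Int.mod_nonneg a ‹0 < b›
  have h2 := PySem.Int.mod_lt a ‹0 < b›
  omega

def pyLcm (a b : Int) : Int := PySem.Int.floordiv (a * b) (pyGcd a b)

-- count_dupes: sieve an array of size n+1, marking strided ranges, then sum it.
-- (Python's `overlaps[i] = 1` is ported as List.set; at every reachable call the
-- index is in range, so Python never raises here.)
def count_dupes (exp n : Int) : Int :=
  (((PySem.List.pyRange 1 exp).foldl (fun ov e =>
      (PySem.List.pyRange (2 * (PySem.Int.floordiv (pyLcm e exp) exp))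
          ((PySem.Int.floordiv (e * n) exp) + 1)
          (PySem.Int.floordiv (pyLcm e exp) exp)).foldl
        (fun ov i => ov.set i.toNat 1) ov)
    (List.replicate (n + 1).toNat (0 : Int)))).sum

-- inner `while i**e <= n` loop of A; `2 ≤ i ∧ 0 ≤ e` is a totality guard (always true at call sites)
def powLoopA (n i : Int) (ex : List Int) (e : Int) : List Int :=
  if h : i ^ e.toNat ≤ n ∧ 2 ≤ i ∧ 0 ≤ e then
    powLoopA n i (ex.set (i ^ e.toNat).toNat e) (e + 1)
  else ex
termination_by (n + 1 - i ^ e.toNat).toNat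
decreasing_by
  have hpos : (0:Int) < i ^ e.toNat := pow_pos (by omega) _
  have hnext : i ^ (e + 1).toNat = i ^ e.toNat * i := by
    have : (e + 1).toNat = e.toNat + 1 := by omega
    rw [this, pow_succ]
  have : i ^ e.toNat * 2 ≤ i ^ e.toNat * i := by
    apply mul_le_mul_of_nonneg_left (by omega) (by omega)
  omega

def distinct_powers (n : Int) : Int :=
  let exponents0 := List.replicate (n + 1).toNat (1 : Int)
  let exponents := (PySem.List.pyRange 2 (exponents0.length : Int)).foldl
    (fun ex i => if 1 < PySem.List.pyGetD ex i 0 then ex else powLoopA n i ex 2) exponents0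
  let dupes := exponents.foldl
    (fun d exp => if 1 < exp then d.insert exp (count_dupes exp n) else d)
    (PySem.Dict.empty : PySem.Dict Int Int)
  let exps := exponents.filter (fun exp => 1 < exp)
  -- Python `dupes.get(exp)` (key always present at this point); ported as getD
  let total := exps.foldl (fun t exp => t + dupes.getD exp 0) 0
  (n - 1) * (n - 1) - total

-- ===== PORT B =====

-- scan exponents b in [2, n]; b is shared iff k*b = d*c with d < k and c <= n
def count_shared (k n : Int) : Int :=
  (PySem.List.pyRange 2 (n + 1)).foldl
    (fun c b =>
      if (PySem.List.pyRange 1 k).any (fun d =>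
            decide (PySem.Int.mod (k * b) d = 0 ∧ k * b ≤ d * n)) then c + 1 else c) 0

-- inner `while p <= n` loop of B; `2 ≤ base ∧ 1 ≤ p` is a totality guard (always true at call sites)
def markPowersB (n base : Int) (pw : PySem.Dict Int Int) (p k : Int) : PySem.Dict Int Int :=
  if h : p ≤ n ∧ 2 ≤ base ∧ 1 ≤ p then
    markPowersB n base (pw.insert p k) (p * base) (k + 1)
  else pw
termination_by (n + 1 - p).toNat
decreasing_by
  have : p * 2 ≤ p * base := mul_le_mul_of_nonneg_left (by omega) (by omega)
  omega

-- outer `while base * base <= n` loop of B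
def basesB (n : Int) (pw : PySem.Dict Int Int) (base : Int) : PySem.Dict Int Int :=
  if h : base * base ≤ n then
    basesB n (if pw.contains base then pw else markPowersB n base pw (base * base) 2) (base + 1)
  else pw
termination_by (n + 1 - base).toNat
decreasing_by
  have : base ≤ n := by nlinarith [sq_nonneg base]
  omega

def distinct_powers_alt (n : Int) : Int :=
  let powers := basesB n PySem.Dict.empty 2
  -- Python `shared[k]` after ensuring the key is present; ported as getD
  let res := powers.values.foldl
    (fun (st : PySem.Dict Int Int × Int) k =>
      let shared := if st.1.contains k then st.1 else st.1.insert k (count_shared k n)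
      (shared, st.2 + shared.getD k 0))
    ((PySem.Dict.empty : PySem.Dict Int Int), 0)
  (n - 1) * (n - 1) - res.2

-- ===== PRECONDITION & SPEC =====
def Spec_distinct_powers (n : Int) (out : Int) : Prop := out = distinct_powers_alt n
instance (n : Int) (out : Int) : Decidable (Spec_distinct_powers n out) := by unfold Spec_distinct_powers; infer_instance

-- ===== CLAIM (what is proved, stated in full; the proofs are below) =====
def Claim_equal_distinct_powers : Prop := ∀ (n : Int), Dom_distinct_powers n → Spec_distinct_powers n (distinct_powers n)

-- ===== LEMMAS AND PROOFS =====

theorem pyGcd_dvd_pos (a b : Int) (hb : 0 ≤ b) (h : 0 < a ∨ 0 < b) :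
    pyGcd a b ∣ a ∧ pyGcd a b ∣ b ∧ 0 < pyGcd a b := by
  rw [pyGcd]
  split
  · rename_i hpos
    have hrec := pyGcd_dvd_pos b (PySem.Int.mod a b) (PySem.Int.mod_nonneg a hpos) (Or.inl hpos)
    refine ⟨?_, hrec.1, hrec.2.2⟩
    obtain ⟨h1, h2, _⟩ := hrec
    have hd : pyGcd b (PySem.Int.mod a b) ∣ PySem.Int.floordiv a b * b + PySem.Int.mod a b :=
      dvd_add (Dvd.dvd.mul_left h1 _) h2
    rwa [PySem.Int.floordiv_mul_add_mod a b] at hd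
  · rename_i hneg
    have hb0 : b = 0 := by omega
    subst hb0
    exact ⟨dvd_refl a, dvd_zero a, by omega⟩
termination_by b.toNat
decreasing_by
  have h1 := PySem.Int.mod_nonneg a ‹0 < b›
  have h2 := PySem.Int.mod_lt a ‹0 < b›
  omega

-- pyGcd is divisible by every common divisor
theorem pyGcd_greatest (a b c : Int) (hb : 0 ≤ b) (hca : c ∣ a) (hcb : c ∣ b) :
    c ∣ pyGcd a b := by
  rw [pyGcd]
  split
  · rename_i hpos
    have hcm : c ∣ PySem.Int.mod a b := by
      have : PySem.Int.mod a b = a - PySem.Int.floordiv a b * b := by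
        have := PySem.Int.floordiv_mul_add_mod a b
        omega
      rw [this]
      exact dvd_sub hca (Dvd.dvd.mul_left hcb _)
    exact pyGcd_greatest b (PySem.Int.mod a b) c (PySem.Int.mod_nonneg a hpos) hcb hcm
  · exact hca
termination_by b.toNat
decreasing_by
  have h1 := PySem.Int.mod_nonneg a ‹0 < b›
  have h2 := PySem.Int.mod_lt a ‹0 < b›
  omega

theorem pyGcd_eq_gcd (a b : Int) (ha : 0 ≤ a) (hb : 0 ≤ b) (h : 0 < a ∨ 0 < b) :
    pyGcd a b = (Int.gcd a b : Int) := by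
  obtain ⟨h1, h2, h3⟩ := pyGcd_dvd_pos a b hb h
  refine Int.dvd_antisymm (by omega) (by positivity) ?_ ?_
  · exact Int.dvd_coe_gcd h1 h2
  · exact pyGcd_greatest a b _ hb (Int.gcd_dvd_left a b) (Int.gcd_dvd_right a b)

-- A's per-e step lcm(e, exp) // exp equals e / gcd(e, exp) (exact division)
theorem stepA_eq (d exp : Int) (hd : 1 ≤ d) (hx : 1 ≤ exp) :
    PySem.Int.floordiv (pyLcm d exp) exp = d / (Int.gcd d exp : Int) := by
  unfold pyLcm
  rw [pyGcd_eq_gcd d exp (by omega) (by omega) (Or.inl (by omega))]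
  have hg : (0:Int) < (Int.gcd d exp : Int) := by
    have := Int.gcd_pos_of_ne_zero_left exp (show d ≠ 0 by omega)
    exact_mod_cast this
  have hdvd : (Int.gcd d exp : Int) ∣ d := Int.gcd_dvd_left d exp
  rw [PySem.Int.floordiv_eq_ediv_of_pos hg, PySem.Int.floordiv_eq_ediv_of_pos (by omega)]
  rw [mul_comm d exp, Int.mul_ediv_assoc exp hdvd, Int.mul_ediv_cancel_left _ (by omega)]

theorem step_pos (d exp : Int) (hd : 1 ≤ d) (hx : 1 ≤ exp) :
    1 ≤ d / (Int.gcd d exp : Int) := by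
  have hg : (0:Int) < (Int.gcd d exp : Int) := by
    have := Int.gcd_pos_of_ne_zero_left exp (show d ≠ 0 by omega)
    exact_mod_cast this
  have hdvd : (Int.gcd d exp : Int) ∣ d := Int.gcd_dvd_left d exp
  have hle : (Int.gcd d exp : Int) ≤ d := Int.le_of_dvd (by omega) hdvd
  rw [Int.le_ediv_iff_mul_le hg]
  omega

-- step ∣ b ↔ d ∣ exp * b
theorem step_dvd_iff (d exp b : Int) (hd : 1 ≤ d) (hx : 1 ≤ exp) :
    d / (Int.gcd d exp : Int) ∣ b ↔ d ∣ exp * b := by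
  have hg : (0:Int) < (Int.gcd d exp : Int) := by
    have := Int.gcd_pos_of_ne_zero_left exp (show d ≠ 0 by omega)
    exact_mod_cast this
  set G : Int := (Int.gcd d exp : Int) with hG
  have hdd : G ∣ d := Int.gcd_dvd_left d exp
  have hde : G ∣ exp := Int.gcd_dvd_right d exp
  have hstep : (d / G) * G = d := Int.ediv_mul_cancel hdd
  have hcop : Int.gcd (d / G) (exp / G) = 1 := by
    exact Int.gcd_div_gcd_div_gcd (Int.gcd_pos_of_ne_zero_left exp (show d ≠ 0 by omega))
  have hexp : (exp / G) * G = exp := Int.ediv_mul_cancel hde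
  constructor
  · rintro ⟨t, rfl⟩
    refine ⟨(exp / G) * t, ?_⟩
    calc exp * (d / G * t) = (exp / G * G) * (d / G * t) := by rw [hexp]
      _ = (d / G * G) * (exp / G * t) := by ring
      _ = d * (exp / G * t) := by rw [hstep]
  · intro hdvd
    have h1 : d / G ∣ b * (exp / G) := by
      have h2 : (d / G) * G ∣ (b * (exp / G)) * G := by
        rw [hstep]
        have h3 : (b * (exp / G)) * G = exp * b := by
          calc (b * (exp / G)) * G = (exp / G * G) * b := by ring
            _ = exp * b := by rw [hexp]
        rw [h3]
        exact hdvd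
      exact (mul_dvd_mul_iff_right (by omega : G ≠ 0)).mp h2
    exact Int.dvd_of_dvd_mul_left_of_gcd_one h1 hcop

-- k * (k - 1) ≤ 2 ^ k for 2 ≤ k
theorem mul_pred_le_two_pow (k : Nat) (hk : 2 ≤ k) : k * (k - 1) ≤ 2 ^ k := by
  induction k, hk using Nat.le_induction with
  | base => decide
  | succ m hm ih =>
    by_cases h2 : m = 2
    · subst h2; decide
    · obtain ⟨p, rfl⟩ : ∃ p, m = p + 3 := ⟨m - 3, by omega⟩
      have hstep : (p + 3 + 1) * (p + 3 + 1 - 1) ≤ 2 * ((p + 3) * (p + 3 - 1)) := by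
        have e1 : p + 3 + 1 - 1 = p + 3 := by omega
        have e2 : p + 3 - 1 = p + 2 := by omega
        rw [e1, e2]
        nlinarith
      have := Nat.mul_le_mul_left 2 ih
      calc (p + 3 + 1) * (p + 3 + 1 - 1) ≤ 2 * ((p + 3) * (p + 3 - 1)) := hstep
        _ ≤ 2 * 2 ^ (p + 3) := this
        _ = 2 ^ (p + 3 + 1) := by ring

theorem mark_length (ms ov : List Int) :
    (ms.foldl (fun ov i => ov.set i.toNat 1) ov).length = ov.length := by
  induction ms generalizing ov with
  | nil => rfl
  | cons a ms ih => simpa [List.foldl_cons] using (ih (ov.set a.toNat 1)).trans (by simp)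

theorem mark_getD (ms ov : List Int) (j : Nat) :
    (ms.foldl (fun ov i => ov.set i.toNat 1) ov).getD j 0 =
      if j < ov.length ∧ ∃ m ∈ ms, m.toNat = j then 1 else ov.getD j 0 := by
  induction ms generalizing ov with
  | nil => simp
  | cons a ms ih =>
    rw [List.foldl_cons, ih]
    have hset : (ov.set a.toNat 1).getD j 0 =
        if a.toNat = j ∧ j < ov.length then 1 else ov.getD j 0 := by
      simp only [List.getD, List.getElem?_set]
      by_cases h1 : a.toNat = j <;> by_cases h2 : j < ov.length <;>
        simp [h1, h2] <;> omega
    simp only [List.length_set]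
    rw [hset]
    by_cases hl : j < ov.length <;> by_cases ha : a.toNat = j <;>
        by_cases hm : ∃ m ∈ ms, m.toNat = j <;>
      simp [hl, ha, hm]

theorem sieve_getD (es : List Int) (f : Int → List Int) (ov : List Int) (j : Nat) :
    (es.foldl (fun ov e => (f e).foldl (fun ov i => ov.set i.toNat 1) ov) ov).getD j 0 =
      if j < ov.length ∧ ∃ e ∈ es, ∃ m ∈ f e, m.toNat = j then 1 else ov.getD j 0 := by
  induction es generalizing ov with
  | nil => simp
  | cons a es ih =>
    rw [List.foldl_cons, ih, mark_length, mark_getD]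
    by_cases hm : ∃ e ∈ es, ∃ m ∈ f e, m.toNat = j
    · by_cases hl : j < ov.length <;> simp [hm, hl]
    · by_cases hl : j < ov.length <;> by_cases ha : ∃ m ∈ f a, m.toNat = j <;>
        simp [hm, hl, ha]

theorem sieve_length (es : List Int) (f : Int → List Int) (ov : List Int) :
    (es.foldl (fun ov e => (f e).foldl (fun ov i => ov.set i.toNat 1) ov) ov).length
      = ov.length := by
  induction es generalizing ov with
  | nil => rfl
  | cons a es ih => rw [List.foldl_cons, ih, mark_length]

-- the central per-exponent lemma: A's sieve count equals B's direct scan,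
-- for exponents that actually occur (2 ^ exp ≤ n)
theorem sieve_eq_scan (exp n : Int) (hx : 2 ≤ exp) (hr : 2 ^ exp.toNat ≤ n) :
    count_dupes exp n = count_shared exp n := by
  have hn4 : 4 ≤ n := by
    have h4 : (4:Int) ≤ 2 ^ exp.toNat := by
      calc (4:Int) = 2 ^ 2 := by norm_num
        _ ≤ 2 ^ exp.toNat := pow_le_pow_right₀ (by omega) (by omega)
    omega
  have hn : (0:Int) ≤ n := by omega
  set S : Int → Int := fun d => d / (Int.gcd d exp : Int) with hS
  set es := PySem.List.pyRange 1 exp with hes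
  set f : Int → List Int := fun e =>
    PySem.List.pyRange (2 * (PySem.Int.floordiv (pyLcm e exp) exp))
      ((PySem.Int.floordiv (e * n) exp) + 1)
      (PySem.Int.floordiv (pyLcm e exp) exp) with hf
  have hmem_es : ∀ d ∈ es, 1 ≤ d ∧ d < exp := by
    intro d hd
    rw [hes] at hd
    have := (PySem.List.mem_pyRange_iff_of_pos (by omega : (0:Int) < 1) d).mp hd
    exact ⟨this.1, this.2.1⟩
  have hstepS : ∀ d ∈ es, PySem.Int.floordiv (pyLcm d exp) exp = S d := by
    intro d hd
    exact stepA_eq d exp (hmem_es d hd).1 (by omega)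
  have hSpos : ∀ d ∈ es, 1 ≤ S d := by
    intro d hd
    exact step_pos d exp (hmem_es d hd).1 (by omega)
  have hbound : ∀ d m : Int, 1 ≤ d → (m ≤ PySem.Int.floordiv (d * n) exp ↔ exp * m ≤ d * n) := by
    intro d m hd
    rw [PySem.Int.floordiv_eq_ediv_of_pos (by omega : (0:Int) < exp),
      Int.le_ediv_iff_mul_le (by omega : (0:Int) < exp)]
    constructor <;> intro h <;> nlinarith
  have hfmem : ∀ d ∈ es, ∀ m ∈ f d,
      2 * S d ≤ m ∧ exp * m ≤ d * n ∧ S d ∣ m := by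
    intro d hd m hm
    simp only [hf] at hm
    rw [hstepS d hd] at hm
    have hs := hSpos d hd
    have := (PySem.List.mem_pyRange_iff_of_pos (by omega) m).mp hm
    refine ⟨this.1, by
      have := this.2.1
      rw [← hbound d m (hmem_es d hd).1]
      omega, ?_⟩
    have hdvd : S d ∣ m - 2 * S d := this.2.2
    have h2 : S d ∣ 2 * S d := Dvd.intro_left 2 rfl
    have := dvd_add hdvd h2
    simpa using this
  have hfmem' : ∀ d ∈ es, ∀ m : Int,
      (2 * S d ≤ m ∧ exp * m ≤ d * n ∧ S d ∣ m) → m ∈ f d := by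
    intro d hd m ⟨h1, h2, h3⟩
    simp only [hf]
    rw [hstepS d hd]
    have hs := hSpos d hd
    rw [PySem.List.mem_pyRange_iff_of_pos (by omega)]
    have hb2 : m ≤ PySem.Int.floordiv (d * n) exp := (hbound d m (hmem_es d hd).1).mpr h2
    exact ⟨h1, by omega, dvd_sub h3 (Dvd.intro_left 2 rfl)⟩
  -- the two predicates
  set p : Nat → Bool := fun j => decide (∃ d ∈ es, ∃ m ∈ f d, m.toNat = j) with hp
  set predB : Int → Bool := fun b => es.any (fun d =>
      decide (PySem.Int.mod (exp * b) d = 0 ∧ exp * b ≤ d * n)) with hpredB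
  have hrep : ∀ j : Nat, (List.replicate (n + 1).toNat (0 : Int)).getD j 0 = 0 := by
    intro j
    simp [List.getD, List.getElem?_replicate]
    split <;> simp
  have hpt : ∀ b : Int, 2 ≤ b → b ≤ n →
      ((∃ d ∈ es, ∃ m ∈ f d, m.toNat = b.toNat) ↔ predB b = true) := by
    intro b hb hbn
    rw [hpredB]
    simp only [List.any_eq_true, decide_eq_true_eq]
    constructor
    · rintro ⟨d, hd, m, hm, hmb⟩
      obtain ⟨h1, h2, h3⟩ := hfmem d hd m hm
      have hs := hSpos d hd
      have hmb' : m = b := by omega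
      subst hmb'
      refine ⟨d, hd, ?_, h2⟩
      rw [PySem.Int.mod_eq_zero_iff_dvd]
      rw [← step_dvd_iff d exp m (hmem_es d hd).1 (by omega)]
      exact h3
    · rintro ⟨d, hd, hmod, hle⟩
      have hs := hSpos d hd
      have hd1 := (hmem_es d hd).1
      have hSdvd : S d ∣ b := by
        rw [step_dvd_iff d exp b hd1 (by omega)]
        rw [← PySem.Int.mod_eq_zero_iff_dvd]
        exact hmod
      by_cases hcase : 2 * S d ≤ b
      · exact ⟨d, hd, b, hfmem' d hd b ⟨hcase, hle, hSdvd⟩, rfl⟩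
      · -- b is exactly S d; use d = 1 instead
        have hbS : b = S d := by
          obtain ⟨t, ht⟩ := hSdvd
          have ht1 : t = 1 := by
            rcases lt_trichotomy t 1 with h | h | h
            · exfalso
              have : S d * t ≤ 0 := by nlinarith
              omega
            · exact h
            · exfalso
              have : 2 * S d ≤ S d * t := by nlinarith
              omega
          rw [ht1, mul_one] at ht
          exact ht
        have h1es : (1:Int) ∈ es := by
          rw [hes, PySem.List.mem_pyRange_iff_of_pos (by omega : (0:Int) < 1)]
          refine ⟨by omega, by omega, by simp⟩
        have hS1 : S 1 = 1 := by
          simp only [hS]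
          rw [Int.gcd_one_left]
          simp
        -- exp * b ≤ n since b = S d ≤ d ≤ exp - 1 and exp * (exp - 1) ≤ 2 ^ exp ≤ n
        have hbd : b ≤ exp - 1 := by
          have hdd : S d ≤ d := Int.ediv_le_self _ (by omega)
          have := (hmem_es d hd).2
          omega
        have hexppred : exp * (exp - 1) ≤ 2 ^ exp.toNat := by
          have h := mul_pred_le_two_pow exp.toNat (by omega)
          zify [show 1 ≤ exp.toNat by omega] at h
          rwa [Int.toNat_of_nonneg (by omega : (0:Int) ≤ exp)] at h
        have hexpb : exp * b ≤ n := by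
          have : exp * b ≤ exp * (exp - 1) :=
            mul_le_mul_of_nonneg_left hbd (by omega)
          omega
        refine ⟨1, h1es, b, hfmem' 1 h1es b ⟨by rw [hS1]; omega, by omega, by
          rw [hS1]; exact one_dvd b⟩, rfl⟩
  -- count_dupes is countP p over range (n+1).toNat
  have hcd : count_dupes exp n = (List.countP p (List.range (n + 1).toNat) : Int) := by
    unfold count_dupes
    rw [← hes]
    have hshape : (es.foldl (fun ov e =>
        (PySem.List.pyRange (2 * (PySem.Int.floordiv (pyLcm e exp) exp))
          ((PySem.Int.floordiv (e * n) exp) + 1)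
          (PySem.Int.floordiv (pyLcm e exp) exp)).foldl
          (fun ov i => ov.set i.toNat 1) ov)
        (List.replicate (n + 1).toNat (0 : Int)))
        = (es.foldl (fun ov e => (f e).foldl (fun ov i => ov.set i.toNat 1) ov)
            (List.replicate (n + 1).toNat (0 : Int))) := by
      simp only [hf]
    rw [hshape]
    have hFeq : (es.foldl (fun ov e => (f e).foldl (fun ov i => ov.set i.toNat 1) ov)
        (List.replicate (n + 1).toNat (0 : Int)))
        = (List.range (n + 1).toNat).map (fun j => if p j then (1:Int) else 0) := by
      apply List.ext_getElem
      · rw [sieve_length]; simp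
      · intro j hj hj2
        have hjL : j < (n + 1).toNat := by simpa using hj2
        rw [← List.getD_eq_getElem _ 0 hj, sieve_getD]
        simp only [List.length_replicate, hrep]
        rw [List.getElem_map, List.getElem_range]
        by_cases hQ : ∃ d ∈ es, ∃ m ∈ f d, m.toNat = j <;> simp [hp, hQ, hjL]
    rw [hFeq, PySem.List.sum_map_ite_one_zero]
  -- count_shared is countP predB over pyRange 2 (n+1)
  have hoc : count_shared exp n = (List.countP predB (PySem.List.pyRange 2 (n + 1)) : Int) := by
    unfold count_shared
    rw [← hes]
    have := PySem.List.foldl_count_if predB (PySem.List.pyRange 2 (n + 1)) 0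
    simp only [hpredB] at this ⊢
    rw [this]
    omega
  rw [hcd, hoc]
  -- bridge the two countP's
  set M : Nat := (n - 1).toNat with hM
  have hL : (n + 1).toNat = M + 2 := by omega
  have hsmall : ∀ j : Nat, j < 2 → p j = false := by
    intro j hj
    simp only [hp, decide_eq_false_iff_not]
    rintro ⟨d, hd, m, hm, hm0⟩
    obtain ⟨h1, _, _⟩ := hfmem d hd m hm
    have hs := hSpos d hd
    omega
  have hrange : PySem.List.pyRange 2 (n + 1) =
      (List.range M).map (fun (k : Nat) => 2 + 1 * (k : Int)) := by
    rw [PySem.List.pyRange_of_pos _ _ (by omega : (0:Int) < 1)]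
    have harg : (if (2:Int) < n + 1 then ((n + 1 - 2 + 1 - 1) / 1).toNat else 0) = M := by
      split
      · simp only [Int.ediv_one]; omega
      · omega
    rw [harg]
  have hcc : List.countP (fun k => p (k + 2)) (List.range M)
      = List.countP (fun (k : Nat) => predB (2 + 1 * (k : Int))) (List.range M) := by
    refine List.countP_congr ?_
    intro k hk
    have hkM : k < M := List.mem_range.mp hk
    have hthis := hpt (2 + 1 * (k : Int)) (by omega) (by omega)
    rw [show (2 + 1 * (k : Int)).toNat = k + 2 from by omega] at hthis
    simp only [hp, decide_eq_true_eq]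
    exact hthis
  rw [hL, List.range_succ_eq_map, List.countP_cons, hsmall 0 (by omega),
    List.range_succ_eq_map, List.map_cons, List.countP_cons, List.countP_map,
    hrange, List.countP_map]
  simp only [Function.comp_def, Nat.succ_eq_add_one, hsmall 1 (by omega)]
  rw [show (fun (k : Nat) => p (k + 1 + 1)) = (fun (k : Nat) => p (k + 2)) from by
    funext k; ring_nf, hcc]
  simp [Function.comp_def]

-- ## loop invariant: A's sieve array vs B's dict of perfect powers

def SieveInv (n : Int) (ex : List Int) (pw : PySem.Dict Int Int) : Prop :=
  ex.length = (n + 1).toNat ∧ pw.keys.Nodup ∧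
  (∀ k : Int, pw.get? k =
    if 0 ≤ k ∧ k ≤ n ∧ 1 < ex.getD k.toNat 1 then some (ex.getD k.toNat 1) else none) ∧
  (∀ k v : Int, pw.get? k = some v → 2 ^ v.toNat ≤ n)

theorem Inv_update (n : Int) (ex : List Int) (pw : PySem.Dict Int Int) (m v : Int)
    (hinv : SieveInv n ex pw) (hm0 : 0 ≤ m) (hmn : m ≤ n) (hv : 1 < v)
    (hreach : 2 ^ v.toNat ≤ n) :
    SieveInv n (ex.set m.toNat v) (pw.insert m v) := by
  obtain ⟨hlen, hnd, hget, hpow⟩ := hinv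
  refine ⟨by simp [hlen], PySem.Dict.nodup_keys_insert pw m v hnd, ?_, ?_⟩
  · intro k
    rw [PySem.Dict.get?_insert]
    have hmlt : m.toNat < ex.length := by rw [hlen]; omega
    by_cases hk : k = m
    · subst hk
      have hset : (ex.set k.toNat v).getD k.toNat 1 = v := by
        rw [List.getD_eq_getElem _ _ (by simpa using hmlt)]
        simp
      rw [if_pos rfl, hset, if_pos ⟨hm0, hmn, hv⟩]
    · rw [if_neg hk, hget k]
      by_cases hkt : k.toNat = m.toNat
      · have hkneg : k < 0 := by omega
        rw [if_neg (by omega), if_neg (by omega)]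
      · have hne : m.toNat ≠ k.toNat := fun h => hkt h.symm
        have hset : (ex.set m.toNat v).getD k.toNat 1 = ex.getD k.toNat 1 := by
          simp only [List.getD, List.getElem?_set, if_neg hne]
        rw [hset]
  · intro k w hw
    rw [PySem.Dict.get?_insert] at hw
    by_cases hk : k = m
    · rw [if_pos hk] at hw
      cases hw
      exact hreach
    · rw [if_neg hk] at hw
      exact hpow k w hw

theorem inner_inv (n i : Int) (hi : 2 ≤ i) :
    ∀ N e ex pw, (n + 1 - i ^ e.toNat).toNat = N → 2 ≤ e → SieveInv n ex pw →
      SieveInv n (powLoopA n i ex e) (markPowersB n i pw (i ^ e.toNat) e) := by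
  intro N
  induction N using Nat.strong_induction_on with
  | _ N ih =>
    intro e ex pw hN he hinv
    rw [powLoopA, markPowersB]
    have hpow0 : (0:Int) < i ^ e.toNat := pow_pos (by omega) _
    by_cases hle : i ^ e.toNat ≤ n
    · rw [dif_pos ⟨hle, hi, by omega⟩, dif_pos ⟨hle, hi, by omega⟩]
      have hpow : i ^ (e + 1).toNat = i ^ e.toNat * i := by
        rw [show (e + 1).toNat = e.toNat + 1 from by omega, pow_succ]
      rw [← hpow]
      have hdec : (n + 1 - i ^ (e + 1).toNat).toNat < N := by
        have h2 : i ^ e.toNat * 2 ≤ i ^ e.toNat * i :=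
          mul_le_mul_of_nonneg_left (by omega) (by omega)
        rw [hpow]
        omega
      have hreach : 2 ^ e.toNat ≤ n := by
        calc (2:Int) ^ e.toNat ≤ i ^ e.toNat := by
              exact pow_le_pow_left₀ (by omega) (by omega) _
          _ ≤ n := hle
      exact ih _ hdec (e + 1) _ _ rfl (by omega)
        (Inv_update n ex pw (i ^ e.toNat) e hinv (by omega) hle (by omega) hreach)
    · rw [dif_neg (by tauto), dif_neg (by intro h; exact hle h.1)]
      exact hinv

theorem foldl_id {α β : Type} (l : List α) (f : β → α → β) (b : β)
    (h : ∀ acc, ∀ x ∈ l, f acc x = acc) : l.foldl f b = b := by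
  induction l generalizing b with
  | nil => rfl
  | cons a l ihl =>
    rw [List.foldl_cons, h b a (by simp)]
    exact ihl b (fun acc x hx => h acc x (by simp [hx]))

theorem pyRange_one_nil {a b : Int} (h : b ≤ a) : PySem.List.pyRange a b = [] := by
  rw [PySem.List.pyRange_of_pos _ _ (by omega : (0:Int) < 1), if_neg (by omega)]
  rfl

theorem outer_inv (n : Int) :
    ∀ N i ex pw, (n + 1 - i).toNat = N → 2 ≤ i → SieveInv n ex pw →
      SieveInv n ((PySem.List.pyRange i (n + 1)).foldl
          (fun ex i => if 1 < PySem.List.pyGetD ex i 0 then ex else powLoopA n i ex 2) ex)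
        (basesB n pw i) := by
  intro N
  induction N using Nat.strong_induction_on with
  | _ N ih =>
    intro i ex pw hN hi hinv
    rw [basesB]
    by_cases hsq : i * i ≤ n
    · have hin : i ≤ n := by nlinarith
      rw [dif_pos hsq]
      rw [PySem.List.pyRange_one_cons (by omega : i < n + 1), List.foldl_cons]
      have hilt : i.toNat < ex.length := by rw [hinv.1]; omega
      have hgd : PySem.List.pyGetD ex i 0 = ex.getD i.toNat 1 := by
        rw [PySem.List.pyGetD_of_nonneg ex (0:Int) (by omega)]
        rw [List.getD_eq_getElem ex (0:Int) hilt, List.getD_eq_getElem ex (1:Int) hilt]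
      have hcontains : pw.contains i = (decide (1 < ex.getD i.toNat 1)) := by
        rw [PySem.Dict.contains_eq_isSome_get?, hinv.2.2.1 i]
        by_cases hm : 1 < ex.getD i.toNat 1
        · rw [if_pos ⟨by omega, hin, hm⟩]
          simp only [Option.isSome_some, decide_eq_true hm]
        · rw [if_neg (by tauto)]
          simp only [Option.isSome_none, decide_eq_false hm]
      by_cases hmark : 1 < ex.getD i.toNat 1
      · rw [if_pos (by rw [hgd]; exact hmark), if_pos (by rw [hcontains]; exact decide_eq_true hmark)]
        exact ih _ (by omega) (i + 1) ex pw rfl (by omega) hinv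
      · rw [if_neg (by rw [hgd]; exact hmark), if_neg (by rw [hcontains, decide_eq_false hmark]; simp)]
        have h2 : i * i = i ^ ((2:Int)).toNat := by
          rw [show ((2:Int)).toNat = 2 from rfl, pow_two]
        rw [h2]
        have hinner := inner_inv n i hi _ 2 ex pw rfl (by norm_num) hinv
        exact ih _ (by omega) (i + 1) _ _ rfl (by omega) hinner
    · rw [dif_neg hsq]
      rw [foldl_id]
      · exact hinv
      · intro acc j hj
        have hj' := (PySem.List.mem_pyRange_iff_of_pos (by omega : (0:Int) < 1) j).mp hj
        have hij : i ≤ j := hj'.1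
        have hjj : ¬ j * j ≤ n := by nlinarith
        have hA : powLoopA n j acc 2 = acc := by
          rw [powLoopA, dif_neg]
          rintro ⟨hc, -, -⟩
          have hp2 : j ^ ((2:Int)).toNat = j * j := by
            rw [show ((2:Int)).toNat = 2 from rfl, pow_two]
          rw [hp2] at hc
          exact hjj hc
        split <;> simp [hA]

-- ## tail lemmas: both summations reduce to a sum of counts over the recorded keys

theorem dupes_get (nv : Int) :
    ∀ (l : List Int) (d : PySem.Dict Int Int),
      (∀ k v, d.get? k = some v → v = count_dupes k nv) →
      ∀ k v,
        (l.foldl (fun d exp => if 1 < exp then d.insert exp (count_dupes exp nv) else d)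
          d).get? k = some v → v = count_dupes k nv := by
  intro l
  induction l with
  | nil => intro d h; exact h
  | cons a l ih =>
    intro d h
    rw [List.foldl_cons]
    apply ih
    intro k v hkv
    by_cases ha : 1 < a
    · rw [if_pos ha, PySem.Dict.get?_insert] at hkv
      by_cases hk : k = a
      · rw [if_pos hk] at hkv
        cases hkv
        rw [hk]
      · rw [if_neg hk] at hkv
        exact h k v hkv
    · rw [if_neg ha] at hkv
      exact h k v hkv

theorem dupes_contains (nv : Int) :
    ∀ (l : List Int) (d : PySem.Dict Int Int) (k : Int),
      (d.contains k = true ∨ (k ∈ l ∧ 1 < k)) →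
      (l.foldl (fun d exp => if 1 < exp then d.insert exp (count_dupes exp nv) else d)
        d).contains k = true := by
  intro l
  induction l with
  | nil =>
    intro d k h
    rcases h with h | ⟨h, _⟩
    · exact h
    · simp at h
  | cons a l ih =>
    intro d k h
    rw [List.foldl_cons]
    apply ih
    rcases h with h | ⟨hm, hk⟩
    · left
      by_cases ha : 1 < a
      · rw [if_pos ha, PySem.Dict.contains_insert, h]
        simp
      · rwa [if_neg ha]
    · rcases List.mem_cons.mp hm with rfl | hm'
      · left
        rw [if_pos hk, PySem.Dict.contains_insert]
        simp
      · right
        exact ⟨hm', hk⟩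

theorem btail (nv : Int) :
    ∀ (l : List Int) (c : PySem.Dict Int Int) (acc : Int),
      (∀ k v, c.get? k = some v → v = count_shared k nv) →
      ((l.foldl (fun (st : PySem.Dict Int Int × Int) e =>
          let shared := if st.1.contains e then st.1 else st.1.insert e (count_shared e nv)
          (shared, st.2 + shared.getD e 0)) (c, acc)).2
        = acc + (l.map (fun e => count_shared e nv)).sum) := by
  intro l
  induction l with
  | nil => intro c acc _; simp
  | cons e l ih =>
    intro c acc hc
    rw [List.foldl_cons]
    simp only
    set shared := if c.contains e then c else c.insert e (count_shared e nv) with hshared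
    have hprop : ∀ k v, shared.get? k = some v → v = count_shared k nv := by
      rw [hshared]
      split
      · exact hc
      · intro k v hkv
        rw [PySem.Dict.get?_insert] at hkv
        by_cases hk : k = e
        · rw [if_pos hk] at hkv
          cases hkv
          rw [hk]
        · rw [if_neg hk] at hkv
          exact hc k v hkv
    have hce : shared.getD e 0 = count_shared e nv := by
      rw [hshared]
      split
      · rename_i hcont
        rw [PySem.Dict.contains_eq_isSome_get?] at hcont
        obtain ⟨v, hv⟩ := Option.isSome_iff_exists.mp hcont
        rw [PySem.Dict.getD_of_get?_eq_some _ 0 hv]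
        exact (hc e v hv).symm ▸ rfl
      · exact PySem.Dict.getD_insert_self _ _ _ _
    rw [ih shared (acc + shared.getD e 0) hprop, hce]
    simp [List.sum_cons]
    ring

theorem filter_eq_map_indices (p : Int → Bool) (d : Int) :
    ∀ ex : List Int, ex.filter p =
      ((List.range ex.length).filter (fun j => p (ex.getD j d))).map
        (fun (j : Nat) => ex.getD j d) := by
  intro ex
  induction ex with
  | nil => simp
  | cons a t ih =>
    rw [List.filter_cons, List.length_cons, List.range_succ_eq_map, List.filter_cons]
    have h0 : (a :: t).getD 0 d = a := rfl
    have hcomp : ((List.map Nat.succ (List.range t.length)).filter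
          (fun j => p ((a :: t).getD j d))).map (fun (j : Nat) => (a :: t).getD j d)
        = ((List.range t.length).filter (fun j => p (t.getD j d))).map
            (fun (j : Nat) => t.getD j d) := by
      rw [List.filter_map, List.map_map]
      congr 1
    rw [h0]
    by_cases hp : p a = true
    · rw [if_pos hp, if_pos hp, List.map_cons, h0, hcomp, ih]
    · rw [if_neg hp, if_neg hp, hcomp, ih]

-- ## assembly

theorem SieveInv_init (n : Int) :
    SieveInv n (List.replicate (n + 1).toNat 1) PySem.Dict.empty := by
  refine ⟨by simp, ?_, ?_, ?_⟩
  · exact PySem.Dict.nodup_keys_empty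
  · intro k
    rw [PySem.Dict.get?_empty]
    have hg : (List.replicate (n + 1).toNat (1:Int)).getD k.toNat 1 = 1 := by
      simp [List.getD, List.getElem?_replicate]
      split <;> simp
    rw [hg, if_neg (by omega)]
  · intro k v h
    rw [PySem.Dict.get?_empty] at h
    cases h

def exAfun (n : Int) : List Int :=
  (PySem.List.pyRange 2 (n + 1)).foldl
    (fun ex i => if 1 < PySem.List.pyGetD ex i 0 then ex else powLoopA n i ex 2)
    (List.replicate (n + 1).toNat 1)

theorem distinct_powers_reshape (n : Int) (hn : 0 ≤ n) :
    distinct_powers n = (n - 1) * (n - 1) -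
      ((exAfun n).filter (fun exp => 1 < exp)).foldl
        (fun t exp => t + ((exAfun n).foldl
            (fun d exp => if 1 < exp then d.insert exp (count_dupes exp n) else d)
            (PySem.Dict.empty : PySem.Dict Int Int)).getD exp 0) 0 := by
  simp only [distinct_powers, exAfun]
  rw [show (((List.replicate (n + 1).toNat (1:Int)).length : Nat) : Int) = n + 1 from by
    simp; omega]

theorem sums_eq (n : Int) (hn : 0 ≤ n) (ex : List Int) (pw : PySem.Dict Int Int)
    (hinv : SieveInv n ex pw) :
    (ex.filter (fun exp => (1:Int) < exp)).foldl
        (fun t exp => t + (ex.foldl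
            (fun d exp => if 1 < exp then d.insert exp (count_dupes exp n) else d)
            (PySem.Dict.empty : PySem.Dict Int Int)).getD exp 0) 0
      = (pw.values.foldl
          (fun (st : PySem.Dict Int Int × Int) e =>
            let shared := if st.1.contains e then st.1 else st.1.insert e (count_shared e n)
            (shared, st.2 + shared.getD e 0))
          ((PySem.Dict.empty : PySem.Dict Int Int), 0)).2 := by
  obtain ⟨hlen, hnd, hget, hpow⟩ := hinv
  have hempty : ∀ k v : Int, (PySem.Dict.empty : PySem.Dict Int Int).get? k = some v → False := by
    intro k v h
    rw [PySem.Dict.get?_empty] at h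
    cases h
  -- A's total is the sum of count_dupes over the filtered cells
  have hAtot : (ex.filter (fun exp => (1:Int) < exp)).foldl
        (fun t exp => t + (ex.foldl
            (fun d exp => if 1 < exp then d.insert exp (count_dupes exp n) else d)
            (PySem.Dict.empty : PySem.Dict Int Int)).getD exp 0) 0
      = ((ex.filter (fun exp => (1:Int) < exp)).map (fun v => count_dupes v n)).sum := by
    rw [PySem.List.foldl_congr_mem _ _ (fun t exp => t + count_dupes exp n) 0 ?_]
    · rw [PySem.List.foldl_add]
      ring
    · intro acc x hx
      have hx' := List.mem_filter.mp hx
      have hx2 : 1 < x := by simpa using hx'.2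
      have hcont := dupes_contains n ex PySem.Dict.empty x (Or.inr ⟨hx'.1, hx2⟩)
      rw [PySem.Dict.contains_eq_isSome_get?] at hcont
      obtain ⟨v, hv⟩ := Option.isSome_iff_exists.mp hcont
      have hvv := dupes_get n ex PySem.Dict.empty
        (fun k v h => absurd h (fun h => hempty k v h)) x v hv
      rw [PySem.Dict.getD_of_get?_eq_some _ 0 hv, hvv]
  -- B's total is the sum of count_shared over the dict values
  have hBtot : (pw.values.foldl
          (fun (st : PySem.Dict Int Int × Int) e =>
            let shared := if st.1.contains e then st.1 else st.1.insert e (count_shared e n)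
            (shared, st.2 + shared.getD e 0))
          ((PySem.Dict.empty : PySem.Dict Int Int), 0)).2
      = (pw.values.map (fun e => count_shared e n)).sum := by
    rw [btail n pw.values PySem.Dict.empty 0 (fun k v h => absurd h (fun h => hempty k v h))]
    ring
  rw [hAtot, hBtot]
  -- both sums are sums over the recorded keys
  set g : Int → Int := fun k => count_dupes (ex.getD k.toNat 1) n with hg
  set KA : List Int := ((List.range ex.length).filter
      (fun j => decide (1 < ex.getD j 1))).map (fun (j : Nat) => (j : Int)) with hKA
  have hAA : ((ex.filter (fun exp => (1:Int) < exp)).map (fun v => count_dupes v n)).sum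
      = (KA.map g).sum := by
    rw [filter_eq_map_indices (fun v => decide (1 < v)) 1 ex, List.map_map, hKA, List.map_map]
    apply congrArg List.sum
    apply List.map_congr_left
    intro j _
    simp [hg]
  have hKAnodup : KA.Nodup := by
    rw [hKA]
    exact ((List.nodup_range).filter _).map (fun a b h => by exact_mod_cast h)
  have hmemiff : ∀ k, k ∈ KA ↔ k ∈ pw.keys := by
    intro k
    constructor
    · intro hk
      rw [hKA] at hk
      obtain ⟨j, hj, rfl⟩ := List.mem_map.mp hk
      have hj' := List.mem_filter.mp hj
      have hjr : j < ex.length := List.mem_range.mp hj'.1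
      have hjv : 1 < ex.getD j 1 := by simpa using hj'.2
      rw [← PySem.Dict.contains_iff_mem_keys, PySem.Dict.contains_eq_isSome_get?, hget]
      rw [if_pos ⟨by omega, by omega, by simpa using hjv⟩]
      · rfl
    · intro hk
      rw [← PySem.Dict.contains_iff_mem_keys, PySem.Dict.contains_eq_isSome_get?, hget] at hk
      by_cases hc : 0 ≤ k ∧ k ≤ n ∧ 1 < ex.getD k.toNat 1
      · rw [hKA]
        refine List.mem_map.mpr ⟨k.toNat, List.mem_filter.mpr ⟨List.mem_range.mpr ?_, ?_⟩, by omega⟩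
        · omega
        · simpa using hc.2.2
      · rw [if_neg hc] at hk
        simp at hk
  have hperm : KA.Perm pw.keys := (List.perm_ext_iff_of_nodup hKAnodup hnd).mpr hmemiff
  have hBB : (pw.values.map (fun e => count_shared e n)).sum = (pw.keys.map g).sum := by
    rw [PySem.Dict.values_eq_map_keys pw hnd 0, List.map_map]
    apply congrArg List.sum
    apply List.map_congr_left
    intro k hk
    have hcont : pw.contains k = true := (PySem.Dict.contains_iff_mem_keys pw k).mpr hk
    rw [PySem.Dict.contains_eq_isSome_get?] at hcont
    obtain ⟨v, hv⟩ := Option.isSome_iff_exists.mp hcont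
    have hcond := hget k
    rw [hv] at hcond
    by_cases hc : 0 ≤ k ∧ k ≤ n ∧ 1 < ex.getD k.toNat 1
    · rw [if_pos hc] at hcond
      have hveq : v = ex.getD k.toNat 1 := by injection hcond
      have h2v : 2 ≤ v := by omega
      have hreach := hpow k v hv
      simp only [Function.comp_apply, hg]
      rw [PySem.Dict.getD_of_get?_eq_some _ 0 hv, hveq,
        ← sieve_eq_scan (ex.getD k.toNat 1) n (by omega) (by rw [← hveq]; exact hreach)]
    · rw [if_neg hc] at hcond
      cases hcond
  rw [hAA, hBB]
  exact (hperm.map g).sum_eq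

-- ===== VERDICT (by name: the statement is the Claim_ definition above) =====
theorem distinct_powers_spec : Claim_equal_distinct_powers := by
  intro n _
  show distinct_powers n = distinct_powers_alt n
  by_cases hn : 0 ≤ n
  · have hinv := outer_inv n ((n + 1 - 2).toNat) 2 _ _ rfl (le_refl 2) (SieveInv_init n)
    rw [distinct_powers_reshape n hn]
    simp only [distinct_powers_alt]
    rw [sums_eq n hn (exAfun n) (basesB n PySem.Dict.empty 2) hinv]
  · -- n < 0: A's array and B's dict are both empty
    have h0 : (n + 1).toNat = 0 := by omega
    simp only [distinct_powers, distinct_powers_alt, h0]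
    rw [basesB, dif_neg (by omega : ¬ (2:Int) * 2 ≤ n)]
    rw [show ((List.replicate 0 (1:Int)).length : Int) = 0 from by simp]
    rw [pyRange_one_nil (by omega : (0:Int) ≤ 2)]
    simp [PySem.Dict.values, PySem.Dict.empty]
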